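-- pv_equiv track=rewrite | github.com/nurnisi/algorithms-and-data-structures | codesignal/05-asana-smartAssigning.py | smartAssigning
-- ===== SOURCE A (Python) =====
-- def smartAssigning(names, statuses, projects, tasks):
--     maxTasks = maxProjects = float('inf')
--     highest = None
--
--     for i in range(len(names)):
--         if statuses[i]:
--             continue
--         if tasks[i] < maxTasks or (tasks[i] == maxTasks and projects[i] < maxProjects):
--             maxTasks = tasks[i]
--             maxProjects = projects[i]
--             highest = names[i]
--
--     return highest
-- ===== SOURCE B (Python) =====
-- def smartAssigning(names, statuses, projects, tasks):
--     candidates = [i for i in range(len(names)) if not statuses[i]]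
--     candidates.sort(key=lambda i: (tasks[i], projects[i]))
--     if not candidates:
--         return None
--     return names[candidates[0]]
-- ===== Notes on version B (the rewrite author's own statement) =====
-- stated objective: alternative
-- what changed: Replaces A's single-pass running-minimum scan by building the list of active indices and stably sorting it by the key (tasks[i], projects[i]), returning the name at the front (stability keeps the earliest index among exact key ties, matching A's strict-< keep-first rule); Pre_ excludes inputs where an out-of-range index access raises IndexError, which slightly narrows A's domain because A can return without ever reading a missing projects entry.
-- outside the precondition, e.g. on smartAssigning(['a', 'b'], [False, False], [0], [1, 2]): A returns 'a', B raises IndexError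
import Mathlib
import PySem

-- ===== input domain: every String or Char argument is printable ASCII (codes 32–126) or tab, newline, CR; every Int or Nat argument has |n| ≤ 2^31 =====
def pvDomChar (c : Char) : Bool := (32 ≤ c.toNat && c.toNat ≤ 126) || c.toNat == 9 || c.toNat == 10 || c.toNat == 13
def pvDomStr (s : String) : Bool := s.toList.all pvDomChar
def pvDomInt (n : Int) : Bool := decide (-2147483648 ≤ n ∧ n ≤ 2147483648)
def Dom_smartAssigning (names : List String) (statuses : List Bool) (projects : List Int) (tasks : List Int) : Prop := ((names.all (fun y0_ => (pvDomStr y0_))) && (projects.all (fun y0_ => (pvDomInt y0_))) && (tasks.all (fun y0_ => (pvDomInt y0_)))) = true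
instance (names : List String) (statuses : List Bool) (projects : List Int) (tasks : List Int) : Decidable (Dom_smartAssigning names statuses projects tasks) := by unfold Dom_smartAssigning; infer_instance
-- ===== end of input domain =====

-- B replaces A's running-minimum scan with filter-the-active-indices + stable sort by (tasks, projects) + take the front (alternative decomposition; return value only).

-- ===== PORT A =====
-- float('inf') is encoded as `none`: pyLtInf / pyEqInf are Python's `<` / `==` against a possibly-infinite bound.
def pyLtInf (a : Int) (b : Option Int) : Bool :=
  match b with | none => true | some c => decide (a < c)
def pyEqInf (a : Int) (b : Option Int) : Bool :=
  match b with | none => false | some c => a == c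

def smartAssigning (names : List String) (statuses : List Bool) (projects : List Int) (tasks : List Int) : Option String :=
  let r := (PySem.List.pyRange 0 (names.length : Int) 1).foldl
    (fun st i =>
      if PySem.List.pyGetD statuses i false then st
      else
        if pyLtInf (PySem.List.pyGetD tasks i 0) st.1
            || (pyEqInf (PySem.List.pyGetD tasks i 0) st.1
                && pyLtInf (PySem.List.pyGetD projects i 0) st.2.1) then
          (some (PySem.List.pyGetD tasks i 0), some (PySem.List.pyGetD projects i 0),
           PySem.List.pyGet? names i)
        else st)
    ((none : Option Int), (none : Option Int), (none : Option String))
  r.2.2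

-- ===== PORT B =====
def smartAssigning_alt (names : List String) (statuses : List Bool) (projects : List Int) (tasks : List Int) : Option String :=
  let candidates := (PySem.List.pyRange 0 (names.length : Int) 1).filter
      (fun i => !(PySem.List.pyGetD statuses i false))
  let ordered := PySem.List.sorted2 candidates
      (fun i => PySem.List.pyGetD tasks i 0) (fun i => PySem.List.pyGetD projects i 0)
  match ordered with
  | [] => none
  | i :: _ => some (PySem.List.pyGetD names i "")

-- ===== PRECONDITION & SPEC =====
-- Pre_ excludes the inputs on which an index access raises IndexError; it slightly narrows A's
-- domain (see claim cite): it also requires projects[i] for every active i, although A can return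
-- without ever reading a missing projects entry when tasks[i] loses every comparison.
def Pre_smartAssigning (names : List String) (statuses : List Bool) (projects : List Int) (tasks : List Int) : Prop :=
  names.length ≤ statuses.length ∧
  ∀ i < names.length, statuses.getD i true = false → i < tasks.length ∧ i < projects.length
instance (names : List String) (statuses : List Bool) (projects : List Int) (tasks : List Int) : Decidable (Pre_smartAssigning names statuses projects tasks) := by unfold Pre_smartAssigning; infer_instance

def pvWitness_smartAssigning : List String × List Bool × List Int × List Int :=
  (["alice", "bob", "carol"], [false, true, false], [2, 0, 1], [3, 1, 3])

def Spec_smartAssigning (names : List String) (statuses : List Bool) (projects : List Int) (tasks : List Int) (out : Option String) : Prop := out = smartAssigning_alt names statuses projects tasks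
instance (names : List String) (statuses : List Bool) (projects : List Int) (tasks : List Int) (out : Option String) : Decidable (Spec_smartAssigning names statuses projects tasks out) := by unfold Spec_smartAssigning; infer_instance

-- ===== CLAIM (what is proved, stated in full; the proofs are below) =====
def Claim_equal_smartAssigning : Prop := ∀ (names : List String) (statuses : List Bool) (projects : List Int) (tasks : List Int), Dom_smartAssigning names statuses projects tasks → Pre_smartAssigning names statuses projects tasks → Spec_smartAssigning names statuses projects tasks (smartAssigning names statuses projects tasks)

-- ===== LEMMAS AND PROOFS =====

-- the first-minimum fold that both programs compute (proof-only helper)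
def pvMinStep (k1 k2 : Int → Int) (o : Option Int) (y : Int) : Option Int :=
  some (match o with
        | none => y
        | some m => if decide (k1 y < k1 m) || (!decide (k1 m < k1 y) && decide (k2 y < k2 m)) then y else m)

theorem pv_head?_insertBy {α : Type} (before : α → α → Bool) (x : α) (l : List α) :
    (PySem.List.insertBy before x l).head? =
      some (match l.head? with | none => x | some m => if before x m then x else m) := by
  cases l with
  | nil => simp [PySem.List.insertBy]
  | cons y ys =>
      by_cases h : before x y <;> simp [PySem.List.insertBy, h]

theorem pv_head?_foldl_insertBy {α : Type} (before : α → α → Bool) :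
    ∀ (xs : List α) (acc : List α),
      (xs.foldl (fun a y => PySem.List.insertBy before y a) acc).head? =
        xs.foldl (fun (o : Option α) y =>
          some (match o with | none => y | some m => if before y m then y else m)) acc.head? := by
  intro xs
  induction xs with
  | nil => intro acc; rfl
  | cons x t ih =>
      intro acc
      simp only [List.foldl_cons]
      rw [ih, pv_head?_insertBy]

theorem pv_head?_sorted2 (cs : List Int) (k1 k2 : Int → Int) :
    (PySem.List.sorted2 cs k1 k2).head? = cs.foldl (pvMinStep k1 k2) none := by
  show (cs.foldl (fun a y => PySem.List.insertBy _ y a) []).head? = _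
  rw [pv_head?_foldl_insertBy]
  simp only [Bool.false_eq_true, if_false]
  congr 1
  funext o y
  cases o with
  | none => rfl
  | some m =>
      by_cases h : (decide (k1 y < k1 m) || (!decide (k1 m < k1 y) && decide (k2 y < k2 m))) = true <;>
        simp [pvMinStep, h]

-- state abstraction: A's (maxTasks, maxProjects, highest) triple as a function of the current first-min index
def pvStateOf (names : List String) (projects tasks : List Int) (o : Option Int) :
    Option Int × Option Int × Option String :=
  match o with
  | none => (none, none, none)
  | some m => (some (PySem.List.pyGetD tasks m 0), some (PySem.List.pyGetD projects m 0),
               some (PySem.List.pyGetD names m ""))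

theorem pv_fold_abstraction (names : List String) (projects tasks : List Int) :
    ∀ (cs : List Int), (∀ c ∈ cs, 0 ≤ c ∧ c < (names.length : Int)) →
    ∀ (o : Option Int),
      cs.foldl
        (fun st i =>
          if pyLtInf (PySem.List.pyGetD tasks i 0) st.1
              || (pyEqInf (PySem.List.pyGetD tasks i 0) st.1
                  && pyLtInf (PySem.List.pyGetD projects i 0) st.2.1) then
            (some (PySem.List.pyGetD tasks i 0), some (PySem.List.pyGetD projects i 0),
             PySem.List.pyGet? names i)
          else st)
        (pvStateOf names projects tasks o)
      = pvStateOf names projects tasks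
          (cs.foldl (pvMinStep (fun i => PySem.List.pyGetD tasks i 0)
                               (fun i => PySem.List.pyGetD projects i 0)) o) := by
  intro cs
  induction cs with
  | nil => intro _ o; rfl
  | cons c t ih =>
      intro hmem o
      have hc := hmem c (by simp)
      have hname : PySem.List.pyGet? names c = some (PySem.List.pyGetD names c "") := by
        rw [PySem.List.pyGet?_eq_some_getElem names hc.1 hc.2,
            PySem.List.pyGetD_eq_getElem names "" hc.1 hc.2]
      have hstep :
          (if pyLtInf (PySem.List.pyGetD tasks c 0) (pvStateOf names projects tasks o).1
              || (pyEqInf (PySem.List.pyGetD tasks c 0) (pvStateOf names projects tasks o).1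
                  && pyLtInf (PySem.List.pyGetD projects c 0) (pvStateOf names projects tasks o).2.1) then
            (some (PySem.List.pyGetD tasks c 0), some (PySem.List.pyGetD projects c 0),
             PySem.List.pyGet? names c)
          else pvStateOf names projects tasks o)
          = pvStateOf names projects tasks
              (pvMinStep (fun i => PySem.List.pyGetD tasks i 0)
                         (fun i => PySem.List.pyGetD projects i 0) o c) := by
        cases o with
        | none => simp [pvStateOf, pvMinStep, pyLtInf, hname]
        | some m =>
            simp only [pvStateOf, pvMinStep, pyLtInf, pyEqInf]
            have hiff : ((decide (PySem.List.pyGetD tasks c 0 < PySem.List.pyGetD tasks m 0)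
                || (PySem.List.pyGetD tasks c 0 == PySem.List.pyGetD tasks m 0
                    && decide (PySem.List.pyGetD projects c 0 < PySem.List.pyGetD projects m 0))) = true)
                ↔ ((decide (PySem.List.pyGetD tasks c 0 < PySem.List.pyGetD tasks m 0)
                || (!decide (PySem.List.pyGetD tasks m 0 < PySem.List.pyGetD tasks c 0)
                    && decide (PySem.List.pyGetD projects c 0 < PySem.List.pyGetD projects m 0))) = true) := by
              simp only [Bool.or_eq_true, Bool.and_eq_true, decide_eq_true_eq, beq_iff_eq,
                Bool.not_eq_true', decide_eq_false_iff_not]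
              omega
            by_cases h : (decide (PySem.List.pyGetD tasks c 0 < PySem.List.pyGetD tasks m 0)
                || (PySem.List.pyGetD tasks c 0 == PySem.List.pyGetD tasks m 0
                    && decide (PySem.List.pyGetD projects c 0 < PySem.List.pyGetD projects m 0))) = true
            · rw [if_pos h, if_pos (hiff.mp h), hname]
            · rw [if_neg h, if_neg (fun hb => h (hiff.mpr hb))]
      simp only [List.foldl_cons, hstep]
      exact ih (fun x hx => hmem x (by simp [hx])) _

-- ===== VERDICT (by name: the statement is the Claim_ definition above) =====
theorem smartAssigning_spec : Claim_equal_smartAssigning := by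
  unfold Claim_equal_smartAssigning
  intro names statuses projects tasks _ _
  unfold Spec_smartAssigning smartAssigning smartAssigning_alt
  simp only []
  rw [show (fun (st : Option Int × Option Int × Option String) (i : Int) =>
      if PySem.List.pyGetD statuses i false then st
      else
        if pyLtInf (PySem.List.pyGetD tasks i 0) st.1
            || (pyEqInf (PySem.List.pyGetD tasks i 0) st.1
                && pyLtInf (PySem.List.pyGetD projects i 0) st.2.1) then
          (some (PySem.List.pyGetD tasks i 0), some (PySem.List.pyGetD projects i 0),
           PySem.List.pyGet? names i)
        else st)
    = (fun st i =>
      if (!(PySem.List.pyGetD statuses i false)) = true then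
        (if pyLtInf (PySem.List.pyGetD tasks i 0) st.1
            || (pyEqInf (PySem.List.pyGetD tasks i 0) st.1
                && pyLtInf (PySem.List.pyGetD projects i 0) st.2.1) then
          (some (PySem.List.pyGetD tasks i 0), some (PySem.List.pyGetD projects i 0),
           PySem.List.pyGet? names i)
        else st)
      else st) from by
      funext st i
      by_cases h : PySem.List.pyGetD statuses i false <;> simp [h]]
  rw [← List.foldl_filter]
  have hmem : ∀ c ∈ (PySem.List.pyRange 0 (names.length : Int) 1).filter
      (fun i => !(PySem.List.pyGetD statuses i false)), 0 ≤ c ∧ c < (names.length : Int) := by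
    intro c hc
    have := List.mem_of_mem_filter hc
    exact PySem.List.mem_pyRange_one.mp this
  have habs := pv_fold_abstraction names projects tasks _ hmem none
  simp only [pvStateOf] at habs
  rw [habs]
  rw [show ((PySem.List.pyRange 0 (names.length : Int) 1).filter
      (fun i => !(PySem.List.pyGetD statuses i false))).foldl
        (pvMinStep (fun i => PySem.List.pyGetD tasks i 0) (fun i => PySem.List.pyGetD projects i 0)) none
    = (PySem.List.sorted2 ((PySem.List.pyRange 0 (names.length : Int) 1).filter
        (fun i => !(PySem.List.pyGetD statuses i false)))
        (fun i => PySem.List.pyGetD tasks i 0) (fun i => PySem.List.pyGetD projects i 0)).head?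
    from (pv_head?_sorted2 _ _ _).symm]
  cases PySem.List.sorted2 ((PySem.List.pyRange 0 (names.length : Int) 1).filter
        (fun i => !(PySem.List.pyGetD statuses i false)))
        (fun i => PySem.List.pyGetD tasks i 0) (fun i => PySem.List.pyGetD projects i 0) with
  | nil => rfl
  | cons i rest => rfl
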